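-- pv_equiv track=rewrite | github.com/entimer/AlgorithmStudy | programmers/2020KakaoBlindRecruitment_3.py | create_big_lock
-- ===== SOURCE A (Python) =====
-- def create_big_lock(lock):
--     size = len(lock)
--     big_size = size * 3
--     big = [[0] * big_size for _ in range(big_size)]
--     row = 0
--     col = 0
--     for x in range(size, size * 2):
--         col = 0
--         for y in range(size, size * 2):
--             big[x][y] = lock[row][col]
--             col += 1
--         row += 1
--     return big
-- ===== SOURCE B (Python) =====
-- def create_big_lock(lock):
--     size = len(lock)
--     blank = [[0] * (3 * size) for _ in range(size)]
--     middle = [[0] * size + [row[i] for i in range(size)] + [0] * size for row in lock]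
--     return blank + middle + [[0] * (3 * size) for _ in range(size)]
-- ===== Notes on version B (the rewrite author's own statement) =====
-- stated objective: simpler
-- what changed: B builds each output row directly (zero rows plus padded lock rows concatenated) instead of preallocating a 3N x 3N zero grid and overwriting its center with a nested index loop.
import Mathlib
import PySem

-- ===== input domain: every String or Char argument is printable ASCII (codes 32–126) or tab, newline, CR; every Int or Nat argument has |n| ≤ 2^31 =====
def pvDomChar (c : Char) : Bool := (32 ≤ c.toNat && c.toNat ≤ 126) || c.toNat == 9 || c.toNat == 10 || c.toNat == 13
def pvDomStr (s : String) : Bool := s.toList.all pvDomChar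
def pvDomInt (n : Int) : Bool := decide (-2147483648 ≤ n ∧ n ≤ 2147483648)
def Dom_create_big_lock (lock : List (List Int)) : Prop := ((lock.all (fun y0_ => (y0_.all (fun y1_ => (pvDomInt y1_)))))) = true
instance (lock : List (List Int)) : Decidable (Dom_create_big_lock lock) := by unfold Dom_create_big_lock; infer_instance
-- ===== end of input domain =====

-- B builds each output row directly (zero rows and padded lock rows concatenated) instead of
-- preallocating a 3N x 3N zero grid and overwriting its center with a nested index loop (objective: simpler).


-- ===== PORT A =====
def create_big_lock (lock : List (List Int)) : List (List Int) :=
  let size : Int := lock.length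
  let big_size : Int := size * 3
  let big : List (List Int) := List.replicate big_size.toNat (List.replicate big_size.toNat (0 : Int))
  let st := (PySem.List.pyRange size (size * 2) 1).foldl
    (fun (st : List (List Int) × Int) (x : Int) =>
      let inner := (PySem.List.pyRange size (size * 2) 1).foldl
        (fun (st2 : List (List Int) × Int) (y : Int) =>
          (PySem.List.pySetD st2.1 x
            (PySem.List.pySetD (PySem.List.pyGetD st2.1 x []) y
              (PySem.List.pyGetD (PySem.List.pyGetD lock st.2 []) st2.2 0)),
           st2.2 + 1))
        (st.1, 0)
      (inner.1, st.2 + 1))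
    (big, 0)
  st.1

-- ===== PORT B =====
def create_big_lock_alt (lock : List (List Int)) : List (List Int) :=
  let size : Int := lock.length
  let blank : List (List Int) := List.replicate size.toNat (List.replicate (3 * size).toNat (0 : Int))
  let middle : List (List Int) := lock.map (fun row =>
    List.replicate size.toNat (0 : Int)
      ++ (PySem.List.pyRange 0 size 1).map (fun i => PySem.List.pyGetD row i 0)
      ++ List.replicate size.toNat (0 : Int))
  blank ++ middle ++ List.replicate size.toNat (List.replicate (3 * size).toNat (0 : Int))

-- ===== PRECONDITION & SPEC =====
-- Pre_ excludes exactly the inputs where Python A raises IndexError: a lock row shorter than len(lock).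
def Pre_create_big_lock (lock : List (List Int)) : Prop :=
  ∀ r ∈ lock, lock.length ≤ r.length
instance (lock : List (List Int)) : Decidable (Pre_create_big_lock lock) := by
  unfold Pre_create_big_lock; infer_instance
def pvWitness_create_big_lock : List (List Int) := [[1, 2], [3, 4]]

def Spec_create_big_lock (lock : List (List Int)) (out : List (List Int)) : Prop := out = create_big_lock_alt lock
instance (lock : List (List Int)) (out : List (List Int)) : Decidable (Spec_create_big_lock lock out) := by unfold Spec_create_big_lock; infer_instance

-- ===== CLAIM (what is proved, stated in full; the proofs are below) =====
def Claim_equal_create_big_lock : Prop := ∀ (lock : List (List Int)), Dom_create_big_lock lock → Pre_create_big_lock lock → Spec_create_big_lock lock (create_big_lock lock)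

-- ===== LEMMAS AND PROOFS =====

lemma set_append_len {α : Type} (l1 l2 : List α) (v : α) :
    (l1 ++ l2).set l1.length v = l1 ++ l2.set 0 v := by
  induction l1 with
  | nil => rfl
  | cons a t ih => simp [ih]

-- the inner loop only ever touches row x of the grid: it is `set x` of a fold over that row alone
lemma inner_extract (w : List Int) (x nn : Nat) :
    ∀ (ys : List Nat) (big : List (List Int)) (c : Int), x < big.length →
    ys.foldl
      (fun (st2 : List (List Int) × Int) (y : Nat) =>
        (st2.1.set x
          (PySem.List.pySetD (st2.1.getD x []) ((nn : Int) + (y : Int))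
            (PySem.List.pyGetD w st2.2 0)),
         st2.2 + 1))
      (big, c)
    = (big.set x
        (ys.foldl
          (fun (st2 : List Int × Int) (y : Nat) =>
            (PySem.List.pySetD st2.1 ((nn : Int) + (y : Int)) (PySem.List.pyGetD w st2.2 0), st2.2 + 1))
          (big.getD x [], c)).1,
       (ys.foldl
          (fun (st2 : List Int × Int) (y : Nat) =>
            (PySem.List.pySetD st2.1 ((nn : Int) + (y : Int)) (PySem.List.pyGetD w st2.2 0), st2.2 + 1))
          (big.getD x [], c)).2) := by
  intro ys
  induction ys with
  | nil =>
    intro big c hx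
    simp [List.foldl_nil, List.getElem?_eq_getElem hx, List.set_getElem_self]
  | cons y ys ih =>
    intro big c hx
    simp only [List.foldl_cons]
    rw [ih _ _ (by simp [hx])]
    have h1 : ((big.set x (PySem.List.pySetD (big.getD x []) ((nn : Int) + (y : Int)) (PySem.List.pyGetD w c 0))).getD x [])
        = PySem.List.pySetD (big.getD x []) ((nn : Int) + (y : Int)) (PySem.List.pyGetD w c 0) := by
      simp [List.getD, hx]
    rw [h1, List.set_set]

-- filling consecutive cells of a row that starts as zeros past `pre`
lemma row_run (w : List Int) :
    ∀ (k : Nat) (m : Nat) (pre : List Int) (s : Nat) (c : Int), pre.length = s →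
    (List.range k).foldl
      (fun (st2 : List Int × Int) (j : Nat) =>
        (PySem.List.pySetD st2.1 ((s : Int) + (j : Int)) (PySem.List.pyGetD w st2.2 0), st2.2 + 1))
      (pre ++ List.replicate (k + m) (0 : Int), c)
    = (pre ++ (List.range k).map (fun j : Nat => PySem.List.pyGetD w (c + (j : Int)) 0)
        ++ List.replicate m (0 : Int), c + (k : Int)) := by
  intro k
  induction k with
  | zero => intro m pre s c hs; simp
  | succ k ih =>
    intro m pre s c hs
    rw [List.range_succ_eq_map, List.foldl_cons, List.foldl_map]
    have e0 : ((s : Int) + ((0 : Nat) : Int)) = ((s : Nat) : Int) := by push_cast; ring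
    rw [e0, PySem.List.pySetD_natCast]
    have e1 : k + 1 + m = (k + m) + 1 := by omega
    rw [e1, List.replicate_succ, ← hs, set_append_len, List.set_cons_zero]
    have hbd : (fun (st2 : List Int × Int) (j : Nat) =>
        (PySem.List.pySetD st2.1 ((pre.length : Int) + ((Nat.succ j : Nat) : Int)) (PySem.List.pyGetD w st2.2 0), st2.2 + 1))
        = (fun (st2 : List Int × Int) (j : Nat) =>
        (PySem.List.pySetD st2.1 (((pre.length + 1 : Nat) : Int) + (j : Int)) (PySem.List.pyGetD w st2.2 0), st2.2 + 1)) := by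
      funext st2 j
      congr 2
      push_cast
      ring
    have hsplit : pre ++ (PySem.List.pyGetD w c 0) :: List.replicate (k + m) (0 : Int)
        = (pre ++ [PySem.List.pyGetD w c 0]) ++ List.replicate (k + m) (0 : Int) := by simp
    rw [hbd, hsplit, ih m (pre ++ [PySem.List.pyGetD w c 0]) (pre.length + 1) (c + 1) (by simp)]
    simp only [List.map_cons, List.map_map, Prod.mk.injEq]
    refine ⟨?_, by push_cast; ring⟩
    have h2 : ((fun j : Nat => PySem.List.pyGetD w (c + (j : Int)) 0) ∘ Nat.succ)
        = fun j : Nat => PySem.List.pyGetD w (c + 1 + (j : Int)) 0 := by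
      funext j
      simp only [Function.comp]
      congr 1
      push_cast
      ring
    rw [h2]
    simp

lemma getD_append_len {α : Type} (l1 : List α) (a : α) (l2 : List α) (d : α) :
    (l1 ++ a :: l2).getD l1.length d = a := by
  induction l1 with
  | nil => rfl
  | cons b tl ih => simp

-- what one pass of the inner loop writes over a zero row
def fillRow (lock : List (List Int)) (n : Nat) (r : Int) : List Int :=
  List.replicate n (0 : Int)
    ++ (List.range n).map (fun j : Nat =>
        PySem.List.pyGetD (PySem.List.pyGetD lock r []) ((0 : Int) + (j : Int)) 0)
    ++ List.replicate n (0 : Int)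

-- the outer loop fills consecutive grid rows past `pre` with fillRow
lemma outer_run (lock : List (List Int)) (n : Nat) :
    ∀ (k m : Nat) (pre : List (List Int)) (s : Nat) (c : Int), pre.length = s →
    (List.range k).foldl
      (fun (st : List (List Int) × Int) (j : Nat) =>
        (((List.range n).foldl
          (fun (st2 : List (List Int) × Int) (j2 : Nat) =>
            (PySem.List.pySetD st2.1 ((s : Int) + (j : Int))
              (PySem.List.pySetD (PySem.List.pyGetD st2.1 ((s : Int) + (j : Int)) [])
                ((n : Int) + (j2 : Int))
                (PySem.List.pyGetD (PySem.List.pyGetD lock st.2 []) st2.2 0)),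
             st2.2 + 1))
          (st.1, 0)).1,
         st.2 + 1))
      (pre ++ List.replicate (k + m) (List.replicate (3 * n) (0 : Int)), c)
    = (pre ++ (List.range k).map (fun j : Nat => fillRow lock n (c + (j : Int)))
        ++ List.replicate m (List.replicate (3 * n) (0 : Int)), c + (k : Int)) := by
  intro k
  induction k with
  | zero => intro m pre s c hs; simp
  | succ k ih =>
    intro m pre s c hs
    rw [List.range_succ_eq_map, List.foldl_cons, List.foldl_map]
    have e0 : ((s : Int) + ((0 : Nat) : Int)) = ((s : Nat) : Int) := by push_cast; ring
    rw [e0]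
    simp only [PySem.List.pySetD_natCast, PySem.List.pyGetD_natCast]
    have e1 : k + 1 + m = (k + m) + 1 := by omega
    rw [e1, List.replicate_succ]
    rw [inner_extract (PySem.List.pyGetD lock c []) s n (List.range n)
        (pre ++ List.replicate (3 * n) (0 : Int) :: List.replicate (k + m) (List.replicate (3 * n) (0 : Int))) 0
        (by simp; omega)]
    rw [← hs, getD_append_len]
    have hz : List.replicate (3 * n) (0 : Int) = List.replicate n (0 : Int) ++ List.replicate (n + n) (0 : Int) := by
      rw [← List.replicate_add]; congr 1; omega
    have hrow := row_run (PySem.List.pyGetD lock c []) n n (List.replicate n (0 : Int)) n 0 (by simp)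
    rw [← hz] at hrow
    rw [hrow]
    have hfill : List.replicate n (0 : Int)
        ++ (List.range n).map (fun j : Nat =>
            PySem.List.pyGetD (PySem.List.pyGetD lock c []) ((0 : Int) + (j : Int)) 0)
        ++ List.replicate n (0 : Int) = fillRow lock n c := rfl
    rw [hfill, set_append_len, List.set_cons_zero]
    have hbd : (fun (st : List (List Int) × Int) (j : Nat) =>
        (((List.range n).foldl
          (fun (st2 : List (List Int) × Int) (j2 : Nat) =>
            (PySem.List.pySetD st2.1 ((pre.length : Int) + ((Nat.succ j : Nat) : Int))
              (PySem.List.pySetD (PySem.List.pyGetD st2.1 ((pre.length : Int) + ((Nat.succ j : Nat) : Int)) [])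
                ((n : Int) + (j2 : Int))
                (PySem.List.pyGetD (PySem.List.pyGetD lock st.2 []) st2.2 0)),
             st2.2 + 1))
          (st.1, 0)).1,
         st.2 + 1))
        = (fun (st : List (List Int) × Int) (j : Nat) =>
        (((List.range n).foldl
          (fun (st2 : List (List Int) × Int) (j2 : Nat) =>
            (PySem.List.pySetD st2.1 (((pre.length + 1 : Nat) : Int) + (j : Int))
              (PySem.List.pySetD (PySem.List.pyGetD st2.1 (((pre.length + 1 : Nat) : Int) + (j : Int)) [])
                ((n : Int) + (j2 : Int))
                (PySem.List.pyGetD (PySem.List.pyGetD lock st.2 []) st2.2 0)),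
             st2.2 + 1))
          (st.1, 0)).1,
         st.2 + 1)) := by
      have ecast : ∀ j : Nat, ((pre.length : Int) + ((Nat.succ j : Nat) : Int)) = (((pre.length + 1 : Nat) : Int) + (j : Int)) := by
        intro j; push_cast; ring
      funext st j
      rw [ecast]
    have hsplit : pre ++ fillRow lock n c :: List.replicate (k + m) (List.replicate (3 * n) (0 : Int))
        = (pre ++ [fillRow lock n c]) ++ List.replicate (k + m) (List.replicate (3 * n) (0 : Int)) := by simp
    rw [hbd, hsplit, ih m (pre ++ [fillRow lock n c]) (pre.length + 1) (c + 1) (by simp)]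
    simp only [List.map_cons, List.map_map, Prod.mk.injEq]
    refine ⟨?_, by push_cast; ring⟩
    have h2 : ((fun j : Nat => fillRow lock n (c + (j : Int))) ∘ Nat.succ)
        = fun j : Nat => fillRow lock n (c + 1 + (j : Int)) := by
      funext j
      simp only [Function.comp]
      congr 1
      push_cast
      ring
    rw [h2]
    simp

theorem create_big_lock_spec : Claim_equal_create_big_lock := by
  intro lock _ hpre
  show create_big_lock lock = create_big_lock_alt lock
  simp only [create_big_lock, create_big_lock_alt]
  have hn3 : ((lock.length : Int) * 3).toNat = 3 * lock.length := by omega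
  have hn3' : ((3 : Int) * (lock.length : Int)).toNat = 3 * lock.length := by omega
  have hn1 : ((lock.length : Int)).toNat = lock.length := by omega
  have hn2 : ((lock.length : Int) * 2 - (lock.length : Int)).toNat = lock.length := by omega
  rw [PySem.List.pyRange_one]
  simp only [hn2, hn3, hn3', hn1, List.foldl_map]
  have hsplit : ∀ (zr : List Int), List.replicate (3 * lock.length) zr
      = List.replicate lock.length zr ++ List.replicate (lock.length + lock.length) zr := by
    intro zr; rw [← List.replicate_add]; congr 1; omega
  rw [hsplit]
  rw [outer_run lock lock.length lock.length lock.length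
      (List.replicate lock.length (List.replicate (3 * lock.length) (0 : Int))) lock.length 0 (by simp)]
  have hmid : (List.range lock.length).map (fun j : Nat => fillRow lock lock.length ((0 : Int) + (j : Int)))
      = lock.map (fun row => List.replicate lock.length (0 : Int)
          ++ (PySem.List.pyRange 0 (lock.length : Int) 1).map (fun i => PySem.List.pyGetD row i 0)
          ++ List.replicate lock.length (0 : Int)) := by
    apply List.ext_getElem (by simp)
    intro i h1 h2
    simp only [List.getElem_map, List.getElem_range]
    have h2' : i < lock.length := by simpa using h2
    have hw : PySem.List.pyGetD lock ((0 : Int) + (i : Int)) [] = lock[i] := by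
      rw [zero_add, PySem.List.pyGetD_natCast]
      exact List.getD_eq_getElem _ _ h2'
    unfold fillRow
    rw [hw]
    simp only [PySem.List.pyRange_zero_natCast, List.map_map]
    congr 1
    congr 1
    apply List.map_congr_left
    intro j _
    simp [Function.comp, zero_add]
  rw [hmid]
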